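-- pv_equiv track=rewrite | github.com/bouthilx/compute-forecast-framework | compute_forecast/pipeline/pdf_acquisition/discovery/sources/hal_collector.py | _extract_pdf_url_from_identifiers
-- ===== SOURCE A (Python) =====
-- from typing import Optional, List, Dict, Union
--
-- def _extract_pdf_url_from_identifiers(
--     identifiers: List[str]
-- ) -> Optional[str]:
--     """Extract PDF URL from HAL identifiers.
--
--     Args:
--         identifiers: List of identifiers
--
--     Returns:
--         PDF URL or None
--     """
--     if not identifiers:
--         return None
--
--     # Priority order: .pdf files, /file/, /document
--     for identifier in identifiers:
--         if identifier and identifier.endswith(".pdf"):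
--             return identifier
--
--     for identifier in identifiers:
--         if identifier and "/file/" in identifier:
--             return identifier
--
--     for identifier in identifiers:
--         if identifier and "/document" in identifier:
--             return identifier
--
--     return None
-- ===== SOURCE B (Python) =====
-- from typing import Optional, List
--
-- def _extract_pdf_url_from_identifiers(identifiers: List[str]) -> Optional[str]:
--     """Single pass: return the first .pdf immediately; otherwise remember the
--     first '/file/' and first '/document' matches and pick by priority at the end."""
--     first_file = None
--     first_document = None
--     for identifier in identifiers:
--         if not identifier:
--             continue
--         if identifier.endswith(".pdf"):
--             return identifier
--         if first_file is None and "/file/" in identifier: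
--             first_file = identifier
--         if first_document is None and "/document" in identifier:
--             first_document = identifier
--     return first_file if first_file is not None else first_document
-- ===== Notes on version B (the rewrite author's own statement) =====
-- stated objective: alternative
-- what changed: Replaced A's three sequential scans of the list with one single pass that returns a .pdf match immediately and remembers the first '/file/' and first '/document' matches for the final priority pick.
import Mathlib
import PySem

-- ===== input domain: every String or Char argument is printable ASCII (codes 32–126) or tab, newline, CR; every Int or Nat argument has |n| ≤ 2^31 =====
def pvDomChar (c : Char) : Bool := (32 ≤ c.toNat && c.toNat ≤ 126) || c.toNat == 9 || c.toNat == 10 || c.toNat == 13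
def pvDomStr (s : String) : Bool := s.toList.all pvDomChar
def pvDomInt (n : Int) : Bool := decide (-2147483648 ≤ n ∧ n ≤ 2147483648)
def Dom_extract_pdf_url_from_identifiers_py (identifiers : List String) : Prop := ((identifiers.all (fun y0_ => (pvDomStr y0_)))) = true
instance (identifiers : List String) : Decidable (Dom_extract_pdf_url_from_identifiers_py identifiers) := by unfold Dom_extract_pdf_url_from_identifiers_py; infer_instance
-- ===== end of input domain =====

-- B is a single pass over the list (three scans in A); return value only, no side effects.

-- ===== PORT A =====
-- Three sequential scans, each a for-loop with early return = List.find? of its predicate;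
-- 'identifier and …' is the truthiness test s ≠ "".
def extract_pdf_url_from_identifiers_py (identifiers : List String) : Option String :=
  if identifiers = [] then none
  else
    match identifiers.find? (fun s => !(s == "") && PySem.Str.endswith s ".pdf") with
    | some s => some s
    | none =>
      match identifiers.find? (fun s => !(s == "") && PySem.Str.isIn "/file/" s) with
      | some s => some s
      | none =>
        match identifiers.find? (fun s => !(s == "") && PySem.Str.isIn "/document" s) with
        | some s => some s
        | none => none

-- ===== PORT B =====
-- Single pass carrying the two accumulators first_file / first_document.
def extractAltLoop : List String → Option String → Option String → Option String
  | [], firstFile, firstDocument => firstFile.or firstDocument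
  | s :: rest, firstFile, firstDocument =>
    if s == "" then extractAltLoop rest firstFile firstDocument
    else if PySem.Str.endswith s ".pdf" then some s
    else
      extractAltLoop rest
        (if firstFile.isNone && PySem.Str.isIn "/file/" s then some s else firstFile)
        (if firstDocument.isNone && PySem.Str.isIn "/document" s then some s else firstDocument)

def extract_pdf_url_from_identifiers_py_alt (identifiers : List String) : Option String :=
  extractAltLoop identifiers none none

-- ===== PRECONDITION & SPEC =====
def Spec_extract_pdf_url_from_identifiers_py (identifiers : List String) (out : Option String) : Prop := out = extract_pdf_url_from_identifiers_py_alt identifiers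
instance (identifiers : List String) (out : Option String) : Decidable (Spec_extract_pdf_url_from_identifiers_py identifiers out) := by unfold Spec_extract_pdf_url_from_identifiers_py; infer_instance

-- ===== CLAIM (what is proved, stated in full; the proofs are below) =====
def Claim_equal_extract_pdf_url_from_identifiers_py : Prop := ∀ (identifiers : List String), Dom_extract_pdf_url_from_identifiers_py identifiers → Spec_extract_pdf_url_from_identifiers_py identifiers (extract_pdf_url_from_identifiers_py identifiers)

-- ===== LEMMAS AND PROOFS =====

-- Characterisation of B's loop: it returns the first .pdf match if any, else the
-- accumulator-or-first '/file/' match, else the accumulator-or-first '/document' match.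
theorem extractAltLoop_eq (l : List String) : ∀ (ff fd : Option String),
    extractAltLoop l ff fd =
      match l.find? (fun s => !(s == "") && PySem.Str.endswith s ".pdf") with
      | some s => some s
      | none =>
        (ff.or (l.find? (fun s => !(s == "") && PySem.Str.isIn "/file/" s))).or
          (fd.or (l.find? (fun s => !(s == "") && PySem.Str.isIn "/document" s))) := by
  induction l with
  | nil => intro ff fd; simp [extractAltLoop]
  | cons s rest ih =>
    intro ff fd
    by_cases hs : s = ""
    · subst hs
      simp [extractAltLoop, List.find?, ih]
    · have hs' : (s == "") = false := by simpa using hs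
      by_cases hp : PySem.Str.endswith s ".pdf" = true
      · have hp2 : PySem.Chars.endswith s.toList ['.', 'p', 'd', 'f'] = true := by
          rw [PySem.Chars.endswith_iff]; simpa [pysem] using hp
        simp [extractAltLoop, List.find?, hs', hp2]
      · have hp' : PySem.Str.endswith s ".pdf" = false := by simpa using hp
        simp only [extractAltLoop, hs', hp', List.find?, Bool.not_false, Bool.true_and,
          if_false, Bool.false_eq_true, ih]
        cases hf : rest.find? (fun s => !(s == "") && PySem.Str.endswith s ".pdf") <;>
          cases hff : PySem.Str.isIn "/file/" s <;>
            cases hfd : PySem.Str.isIn "/document" s <;>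
              cases ff <;> cases fd <;>
                simp [hff, hfd, Option.or]

-- ===== VERDICT (by name: the statement is the Claim_ definition above) =====
theorem extract_pdf_url_from_identifiers_py_spec : Claim_equal_extract_pdf_url_from_identifiers_py := by
  intro identifiers _
  unfold Spec_extract_pdf_url_from_identifiers_py
  unfold extract_pdf_url_from_identifiers_py extract_pdf_url_from_identifiers_py_alt
  rw [extractAltLoop_eq]
  cases identifiers with
  | nil => simp
  | cons s rest =>
    simp only [reduceCtorEq, if_false]
    cases (s :: rest).find? (fun s => !(s == "") && PySem.Str.endswith s ".pdf") <;>
      cases h1 : (s :: rest).find? (fun s => !(s == "") && PySem.Str.isIn "/file/" s) <;>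
        cases h2 : (s :: rest).find? (fun s => !(s == "") && PySem.Str.isIn "/document" s) <;>
          simp [Option.or]
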